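-- pv_equiv track=rewrite | github.com/krishna-glitch/Dahsboard | flask/services/adaptive_data_resolution.py | _get_aggregation_rules
-- ===== SOURCE A (Python) =====
-- from typing import Dict, List, Any, Optional, Tuple
--
-- def _get_aggregation_rules(columns: List[str]) -> Dict[str, str]:
--     """Define intelligent aggregation rules based on measurement types"""
--     agg_rules = {}
--
--     for col in columns:
--         col_lower = col.lower()
--
--         if col == 'site_code':
--             agg_rules[col] = 'first'  # Keep site identifier
--         elif 'temperature' in col_lower:
--             agg_rules[col] = 'mean'   # Average temperature
--         elif 'ph' in col_lower:
--             agg_rules[col] = 'mean'   # Average pH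
--         elif 'level' in col_lower or 'depth' in col_lower:
--             agg_rules[col] = 'mean'   # Average water level/depth
--         elif 'conductivity' in col_lower:
--             agg_rules[col] = 'mean'   # Average conductivity
--         elif 'oxygen' in col_lower:
--             agg_rules[col] = 'mean'   # Average dissolved oxygen
--         elif 'redox' in col_lower:
--             agg_rules[col] = 'mean'   # Average redox potential
--         elif 'flow' in col_lower or 'rate' in col_lower:
--             agg_rules[col] = 'mean'   # Average flow rates
--         elif 'total' in col_lower or 'sum' in col_lower:
--             agg_rules[col] = 'sum'    # Sum totals
--         elif 'count' in col_lower: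
--             agg_rules[col] = 'sum'    # Sum counts
--         elif 'max' in col_lower:
--             agg_rules[col] = 'max'    # Maximum values
--         elif 'min' in col_lower:
--             agg_rules[col] = 'min'    # Minimum values
--         else:
--             # Default aggregation for numeric columns
--             agg_rules[col] = 'mean'
--
--     return agg_rules
-- ===== SOURCE B (Python) =====
-- # B: multi-pass "paint-over" algorithm — start everything at the default,
-- # then sweep rule stages from lowest to highest priority, each overwriting
-- # the columns it matches; the last (highest-priority) write wins, and an
-- # exact 'site_code' sweep runs last.  Same results as A's first-match chain.
--
-- _STAGES = [  # lowest priority first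
--     (('min',), 'min'),
--     (('max',), 'max'),
--     (('count',), 'sum'),
--     (('total', 'sum'), 'sum'),
--     (('flow', 'rate'), 'mean'),
--     (('redox',), 'mean'),
--     (('oxygen',), 'mean'),
--     (('conductivity',), 'mean'),
--     (('level', 'depth'), 'mean'),
--     (('ph',), 'mean'),
--     (('temperature',), 'mean'),
-- ]
--
-- def _get_aggregation_rules(columns):
--     rules = {col: 'mean' for col in columns}
--     for keywords, rule in _STAGES:
--         for col in columns:
--             if any(k in col.lower() for k in keywords):
--                 rules[col] = rule
--     for col in columns:
--         if col == 'site_code':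
--             rules[col] = 'first'
--     return rules
-- ===== Notes on version B (the rewrite author's own statement) =====
-- stated objective: alternative
-- what changed: Replaces A's per-column first-match elif chain with a multi-pass paint-over algorithm: every column starts at the default 'mean', then eleven keyword stages sweep the columns from lowest to highest priority, each overwriting matches so the last (highest-priority) write wins, with a final exact 'site_code' sweep.
import Mathlib
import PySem

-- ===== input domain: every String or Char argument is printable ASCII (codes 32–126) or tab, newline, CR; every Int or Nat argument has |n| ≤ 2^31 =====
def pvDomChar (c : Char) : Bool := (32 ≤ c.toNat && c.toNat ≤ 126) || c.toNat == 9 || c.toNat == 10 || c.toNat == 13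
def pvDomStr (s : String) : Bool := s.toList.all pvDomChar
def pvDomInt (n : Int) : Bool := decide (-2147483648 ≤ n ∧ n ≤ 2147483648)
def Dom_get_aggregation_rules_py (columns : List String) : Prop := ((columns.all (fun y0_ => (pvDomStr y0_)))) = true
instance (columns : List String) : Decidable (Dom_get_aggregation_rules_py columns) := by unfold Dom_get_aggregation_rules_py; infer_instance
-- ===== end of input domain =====

-- B replaces A's per-column first-match elif chain with a multi-pass paint-over:
-- defaults first, then keyword stages from lowest to highest priority overwrite, site_code last (alternative).

-- ===== PORT A =====
-- literal transliteration of A's elif chain, dict built by insertion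
def get_aggregation_rules_py (columns : List String) : List (String × String) :=
  (columns.foldl (fun (agg_rules : PySem.Dict String String) col =>
    let col_lower := PySem.Str.lower col
    if col == "site_code" then agg_rules.insert col "first"
    else if PySem.Str.isIn "temperature" col_lower then agg_rules.insert col "mean"
    else if PySem.Str.isIn "ph" col_lower then agg_rules.insert col "mean"
    else if PySem.Str.isIn "level" col_lower || PySem.Str.isIn "depth" col_lower then agg_rules.insert col "mean"
    else if PySem.Str.isIn "conductivity" col_lower then agg_rules.insert col "mean"
    else if PySem.Str.isIn "oxygen" col_lower then agg_rules.insert col "mean"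
    else if PySem.Str.isIn "redox" col_lower then agg_rules.insert col "mean"
    else if PySem.Str.isIn "flow" col_lower || PySem.Str.isIn "rate" col_lower then agg_rules.insert col "mean"
    else if PySem.Str.isIn "total" col_lower || PySem.Str.isIn "sum" col_lower then agg_rules.insert col "sum"
    else if PySem.Str.isIn "count" col_lower then agg_rules.insert col "sum"
    else if PySem.Str.isIn "max" col_lower then agg_rules.insert col "max"
    else if PySem.Str.isIn "min" col_lower then agg_rules.insert col "min"
    else agg_rules.insert col "mean") PySem.Dict.empty).items

-- ===== PORT B =====
-- the stage table of Source B: lowest priority first; later stages overwrite earlier writes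
def pvStages : List (List String × String) :=
  [(["min"], "min"), (["max"], "max"), (["count"], "sum"), (["total", "sum"], "sum"),
   (["flow", "rate"], "mean"), (["redox"], "mean"), (["oxygen"], "mean"),
   (["conductivity"], "mean"), (["level", "depth"], "mean"), (["ph"], "mean"),
   (["temperature"], "mean")]

def get_aggregation_rules_py_alt (columns : List String) : List (String × String) :=
  let rules0 := columns.foldl (fun (d : PySem.Dict String String) col => d.insert col "mean") PySem.Dict.empty
  let rules1 := pvStages.foldl (fun d st =>
      columns.foldl (fun (d : PySem.Dict String String) col =>
        if st.1.any (fun k => PySem.Str.isIn k (PySem.Str.lower col)) then d.insert col st.2 else d) d) rules0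
  let rules2 := columns.foldl (fun (d : PySem.Dict String String) col =>
      if col == "site_code" then d.insert col "first" else d) rules1
  rules2.items

-- ===== PRECONDITION & SPEC =====
def Spec_get_aggregation_rules_py (columns : List String) (out : List (String × String)) : Prop := out = get_aggregation_rules_py_alt columns
instance (columns : List String) (out : List (String × String)) : Decidable (Spec_get_aggregation_rules_py columns out) := by unfold Spec_get_aggregation_rules_py; infer_instance

-- ===== CLAIM (what is proved, stated in full; the proofs are below) =====
def Claim_equal_get_aggregation_rules_py : Prop := ∀ (columns : List String), Dom_get_aggregation_rules_py columns → Spec_get_aggregation_rules_py columns (get_aggregation_rules_py columns)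

-- ===== LEMMAS AND PROOFS =====

-- A's rule for one column, as a function (proof-only helper)
def pvRuleA (col : String) : String :=
  let col_lower := PySem.Str.lower col
  if col == "site_code" then "first"
  else if PySem.Str.isIn "temperature" col_lower then "mean"
  else if PySem.Str.isIn "ph" col_lower then "mean"
  else if PySem.Str.isIn "level" col_lower || PySem.Str.isIn "depth" col_lower then "mean"
  else if PySem.Str.isIn "conductivity" col_lower then "mean"
  else if PySem.Str.isIn "oxygen" col_lower then "mean"
  else if PySem.Str.isIn "redox" col_lower then "mean"
  else if PySem.Str.isIn "flow" col_lower || PySem.Str.isIn "rate" col_lower then "mean"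
  else if PySem.Str.isIn "total" col_lower || PySem.Str.isIn "sum" col_lower then "sum"
  else if PySem.Str.isIn "count" col_lower then "sum"
  else if PySem.Str.isIn "max" col_lower then "max"
  else if PySem.Str.isIn "min" col_lower then "min"
  else "mean"

-- A's loop body = one insert of pvRuleA
set_option maxHeartbeats 1600000 in
theorem pv_bodyA (d : PySem.Dict String String) (col : String) :
    (let col_lower := PySem.Str.lower col
    if col == "site_code" then d.insert col "first"
    else if PySem.Str.isIn "temperature" col_lower then d.insert col "mean"
    else if PySem.Str.isIn "ph" col_lower then d.insert col "mean"
    else if PySem.Str.isIn "level" col_lower || PySem.Str.isIn "depth" col_lower then d.insert col "mean"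
    else if PySem.Str.isIn "conductivity" col_lower then d.insert col "mean"
    else if PySem.Str.isIn "oxygen" col_lower then d.insert col "mean"
    else if PySem.Str.isIn "redox" col_lower then d.insert col "mean"
    else if PySem.Str.isIn "flow" col_lower || PySem.Str.isIn "rate" col_lower then d.insert col "mean"
    else if PySem.Str.isIn "total" col_lower || PySem.Str.isIn "sum" col_lower then d.insert col "sum"
    else if PySem.Str.isIn "count" col_lower then d.insert col "sum"
    else if PySem.Str.isIn "max" col_lower then d.insert col "max"
    else if PySem.Str.isIn "min" col_lower then d.insert col "min"
    else d.insert col "mean") = d.insert col (pvRuleA col) := by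
  simp only [pvRuleA, apply_ite (fun v => d.insert col v)]

-- getD through an unconditional insert loop with a pointwise value function
theorem pv_getD_fold_insert (f : String → String) (cols : List String)
    (d : PySem.Dict String String) (k df : String) :
    (cols.foldl (fun d c => d.insert c (f c)) d).getD k df
      = if k ∈ cols then f k else d.getD k df := by
  induction cols generalizing d with
  | nil => simp
  | cons c cs ih =>
    simp only [List.foldl_cons, ih, List.mem_cons]
    by_cases h1 : k ∈ cs
    · simp [h1]
    · by_cases h2 : k = c
      · subst h2; simp [h1]
      · simp [h1, h2, PySem.Dict.getD_insert]

-- getD through a conditional overwrite pass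
theorem pv_getD_pass (P : String → Bool) (r : String) (cols : List String)
    (d : PySem.Dict String String) (k df : String) :
    (cols.foldl (fun d c => if P c then d.insert c r else d) d).getD k df
      = if P k = true ∧ k ∈ cols then r else d.getD k df := by
  induction cols generalizing d with
  | nil => simp
  | cons c cs ih =>
    simp only [List.foldl_cons, ih, List.mem_cons]
    by_cases h1 : P k = true ∧ k ∈ cs
    · simp [h1.1, h1.2]
    · by_cases h2 : k = c
      · subst h2
        by_cases hp : P k = true
        · simp only [hp, true_and] at h1
          simp [hp, h1]
        · simp [hp]
      · by_cases hp : P c = true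
        · simp [hp, h2, PySem.Dict.getD_insert]
        · simp [hp, h2]

-- keys are unchanged by a conditional overwrite pass over keys the dict already contains
theorem pv_keys_pass (P : String → Bool) (r : String) (cols : List String)
    (d : PySem.Dict String String) (h : ∀ c ∈ cols, d.contains c = true) :
    (cols.foldl (fun d c => if P c then d.insert c r else d) d).keys = d.keys := by
  induction cols generalizing d with
  | nil => rfl
  | cons c cs ih =>
    simp only [List.foldl_cons]
    by_cases hp : P c = true
    · rw [if_pos hp]
      have hc : d.contains c = true := h c (List.mem_cons_self ..)
      have hk : (d.insert c r).keys = d.keys := PySem.Dict.keys_insert_of_contains _ _ hc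
      rw [ih (d.insert c r) (fun c' hc' => by
        rw [PySem.Dict.contains_insert]
        simp [h c' (List.mem_cons_of_mem _ hc')]), hk]
    · rw [if_neg hp]
      exact ih d (fun c' hc' => h c' (List.mem_cons_of_mem _ hc'))

-- keys of an unconditional insert loop
theorem pv_keys_fold_insert (f : String → String) (cols : List String)
    (d : PySem.Dict String String) :
    (cols.foldl (fun d c => d.insert c (f c)) d).keys = PySem.Set.update d.keys cols :=
  PySem.Dict.keys_foldl_insert cols (fun _ c => f c) d

theorem pv_nodup_fold_insert (f : String → String) (cols : List String) :
    (cols.foldl (fun d c => d.insert c (f c)) PySem.Dict.empty).keys.Nodup :=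
  PySem.Dict.nodup_keys_foldl_insert cols (fun _ c => f c) PySem.Dict.empty PySem.Dict.nodup_keys_empty

-- keys are unchanged by all the stage passes
theorem pv_keys_stages (columns : List String) (sts : List (List String × String))
    (d : PySem.Dict String String) (h : ∀ c ∈ columns, d.contains c = true) :
    (sts.foldl (fun d st =>
      columns.foldl (fun (d : PySem.Dict String String) col =>
        if st.1.any (fun k => PySem.Str.isIn k (PySem.Str.lower col)) then d.insert col st.2 else d) d) d).keys
      = d.keys := by
  induction sts generalizing d with
  | nil => rfl
  | cons st sts ih =>
    simp only [List.foldl_cons]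
    have hk := pv_keys_pass (fun col => st.1.any (fun k => PySem.Str.isIn k (PySem.Str.lower col))) st.2 columns d h
    have hcon : ∀ c ∈ columns,
        (columns.foldl (fun (d : PySem.Dict String String) col =>
          if st.1.any (fun k => PySem.Str.isIn k (PySem.Str.lower col)) then d.insert col st.2 else d) d).contains c = true := by
      intro c hc
      exact (PySem.Dict.contains_iff_mem_keys _ _).mpr (hk ▸ (PySem.Dict.contains_iff_mem_keys _ _).mp (h c hc))
    rw [ih _ hcon, hk]

-- ===== VERDICT (by name: the statement is the Claim_ definition above) =====
theorem get_aggregation_rules_py_spec : Claim_equal_get_aggregation_rules_py := by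
  intro columns _
  unfold Spec_get_aggregation_rules_py get_aggregation_rules_py get_aggregation_rules_py_alt
  -- A's fold is the pvRuleA insert loop
  have hA : (fun (agg_rules : PySem.Dict String String) col =>
      let col_lower := PySem.Str.lower col
      if col == "site_code" then agg_rules.insert col "first"
      else if PySem.Str.isIn "temperature" col_lower then agg_rules.insert col "mean"
      else if PySem.Str.isIn "ph" col_lower then agg_rules.insert col "mean"
      else if PySem.Str.isIn "level" col_lower || PySem.Str.isIn "depth" col_lower then agg_rules.insert col "mean"
      else if PySem.Str.isIn "conductivity" col_lower then agg_rules.insert col "mean"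
      else if PySem.Str.isIn "oxygen" col_lower then agg_rules.insert col "mean"
      else if PySem.Str.isIn "redox" col_lower then agg_rules.insert col "mean"
      else if PySem.Str.isIn "flow" col_lower || PySem.Str.isIn "rate" col_lower then agg_rules.insert col "mean"
      else if PySem.Str.isIn "total" col_lower || PySem.Str.isIn "sum" col_lower then agg_rules.insert col "sum"
      else if PySem.Str.isIn "count" col_lower then agg_rules.insert col "sum"
      else if PySem.Str.isIn "max" col_lower then agg_rules.insert col "max"
      else if PySem.Str.isIn "min" col_lower then agg_rules.insert col "min"
      else agg_rules.insert col "mean")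
      = fun (d : PySem.Dict String String) col => d.insert col (pvRuleA col) := by
    funext d col; exact pv_bodyA d col
  rw [hA]
  dsimp only
  have ndA := pv_nodup_fold_insert pvRuleA columns
  have hkA : (columns.foldl (fun (d : PySem.Dict String String) c => d.insert c (pvRuleA c)) PySem.Dict.empty).keys
      = PySem.Set.update PySem.Dict.empty.keys columns := pv_keys_fold_insert pvRuleA columns PySem.Dict.empty
  have hd0k : (columns.foldl (fun (d : PySem.Dict String String) col => d.insert col "mean") PySem.Dict.empty).keys
      = PySem.Set.update PySem.Dict.empty.keys columns := pv_keys_fold_insert (fun _ => "mean") columns PySem.Dict.empty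
  have hcon0 : ∀ c ∈ columns,
      (columns.foldl (fun (d : PySem.Dict String String) col => d.insert col "mean") PySem.Dict.empty).contains c = true := by
    intro c hc
    refine (PySem.Dict.contains_iff_mem_keys _ _).mpr ?_
    rw [hd0k]
    exact (PySem.Set.mem_update _ _ _).mpr (Or.inr hc)
  have h1k := pv_keys_stages columns pvStages _ hcon0
  have hcon1 : ∀ c ∈ columns,
      (pvStages.foldl (fun d st =>
        columns.foldl (fun (d : PySem.Dict String String) col =>
          if st.1.any (fun k => PySem.Str.isIn k (PySem.Str.lower col)) then d.insert col st.2 else d) d)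
        (columns.foldl (fun (d : PySem.Dict String String) col => d.insert col "mean") PySem.Dict.empty)).contains c = true := by
    intro c hc
    exact (PySem.Dict.contains_iff_mem_keys _ _).mpr (h1k ▸ (PySem.Dict.contains_iff_mem_keys _ _).mp (hcon0 c hc))
  have h2k := pv_keys_pass (fun c => c == "site_code") "first" columns _ hcon1
  have ndB : (columns.foldl (fun (d : PySem.Dict String String) col =>
      if col == "site_code" then d.insert col "first" else d)
      (pvStages.foldl (fun d st =>
        columns.foldl (fun (d : PySem.Dict String String) col =>
          if st.1.any (fun k => PySem.Str.isIn k (PySem.Str.lower col)) then d.insert col st.2 else d) d)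
        (columns.foldl (fun (d : PySem.Dict String String) col => d.insert col "mean") PySem.Dict.empty))).keys.Nodup := by
    rw [h2k, h1k, hd0k]
    exact PySem.Set.nodup_update _ _ PySem.Dict.nodup_keys_empty
  rw [PySem.Dict.items_eq_map_keys _ ndA "mean", PySem.Dict.items_eq_map_keys _ ndB "mean",
      hkA, h2k, h1k, hd0k]
  refine List.map_congr_left ?_
  intro k hkmem
  have hkc : k ∈ columns := by
    rw [PySem.Set.mem_update] at hkmem
    simpa using hkmem
  refine Prod.ext rfl ?_
  show (columns.foldl (fun (d : PySem.Dict String String) c => d.insert c (pvRuleA c)) PySem.Dict.empty).getD k "mean" = _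
  rw [pv_getD_fold_insert pvRuleA columns PySem.Dict.empty k "mean", if_pos hkc]
  simp only [pvStages, List.foldl_cons, List.foldl_nil]
  simp only [pv_getD_pass, pv_getD_fold_insert]
  simp only [hkc, and_true, List.any_cons, List.any_nil, Bool.or_false]
  simp only [pvRuleA, if_true]
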